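-- pv_equiv track=rewrite | github.com/yowatanabe/learn-to-code | python/395/main.py | count_reachable_from_zero
-- ===== SOURCE A (Python) =====
-- from typing import List
-- from collections import deque
--
-- def count_reachable_from_zero(n: int, edges: List[List[int]]) -> int:
--     """
--     有向グラフで、頂点 0 から到達できる頂点数を BFS で数える。
--
--     計算量: O(n + m)
--     n = 頂点数
--     m = 辺数
--     """
--     graph = [[] for _ in range(n)]
--     for u, v in edges:
--         graph[u].append(v)
--
--     visited = [False] * n
--     q = deque([0])
--     visited[0] = True
--     count = 1
--
--     while q:
--         node = q.popleft()
--         for nxt in graph[node]: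
--             if not visited[nxt]:
--                 visited[nxt] = True
--                 count += 1
--                 q.append(nxt)
--
--     return count
-- ===== SOURCE B (Python) =====
-- from typing import List
--
-- def count_reachable_from_zero(n: int, edges: List[List[int]]) -> int:
--     """
--     Count vertices reachable from vertex 0 by round-based edge relaxation
--     (fixpoint iteration) instead of a BFS queue: repeatedly sweep the edge
--     list, marking targets of already-marked sources, until a sweep changes
--     nothing (at most n sweeps are ever needed).
--     """
--     visited = [False] * n
--     visited[0] = True
--     for _ in range(n):
--         changed = False
--         for u, v in edges:
--             if visited[u] and not visited[v]:
--                 visited[v] = True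
--                 changed = True
--         if not changed:
--             break
--     return sum(visited)
-- ===== Notes on version B (the rewrite author's own statement) =====
-- stated objective: alternative
-- what changed: Replaces the deque-based BFS (adjacency list + frontier queue + incremental counter) by round-based fixpoint iteration over the raw edge list: repeatedly sweep all edges marking targets of marked sources until a sweep changes nothing, then sum the visited array.
-- outside the precondition, e.g. on count_reachable_from_zero(2, [[1, 5]]): A returns 1, B returns 1
import Mathlib
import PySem

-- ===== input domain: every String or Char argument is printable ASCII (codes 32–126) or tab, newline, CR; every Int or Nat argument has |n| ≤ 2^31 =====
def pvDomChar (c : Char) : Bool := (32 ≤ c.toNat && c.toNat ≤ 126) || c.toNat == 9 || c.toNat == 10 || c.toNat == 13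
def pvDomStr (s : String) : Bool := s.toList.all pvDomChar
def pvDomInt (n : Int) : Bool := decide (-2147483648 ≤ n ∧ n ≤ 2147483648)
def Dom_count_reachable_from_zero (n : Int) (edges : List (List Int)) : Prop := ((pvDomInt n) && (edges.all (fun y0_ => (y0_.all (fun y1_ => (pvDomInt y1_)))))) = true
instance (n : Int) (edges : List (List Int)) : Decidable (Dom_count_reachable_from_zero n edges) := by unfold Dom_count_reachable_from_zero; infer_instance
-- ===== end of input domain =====

-- B replaces A's deque-based BFS by round-based fixpoint iteration over the raw edge
-- list (sweep all edges marking targets of marked sources until a sweep changes nothing);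
-- same count of vertices reachable from vertex 0 on every input admitted by Pre_.

-- Python list indexing `xs[i]` with -len ≤ i < len: negative indices wrap.
def pvIdx (n : Int) (i : Int) : Nat := (if i < 0 then i + n else i).toNat

-- ===== PORT A =====
-- graph = [[] for _ in range(n)]; for u, v in edges: graph[u].append(v)
-- (a malformed edge, i.e. not a 2-list, raises ValueError in Python: excluded by Pre_, skipped here)
def pvGStep (n : Int) (g : List (List Int)) (e : List Int) : List (List Int) :=
  match e with
  | [u, v] => g.modify (pvIdx n u) (fun l => l ++ [v])
  | _ => g

def pvBuildGraph (n : Int) (edges : List (List Int)) : List (List Int) :=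
  edges.foldl (pvGStep n) (List.replicate n.toNat ([] : List Int))

-- body of the inner `for nxt in graph[node]` loop; state = (visited, q, count).
-- `visited[nxt]` out of range raises IndexError in Python (excluded by Pre_);
-- the default `true` here is only a totality guard (no mark, no growth).
def pvBfsVisit (n : Int) (st : List Bool × List Int × Int) (nxt : Int) : List Bool × List Int × Int :=
  if !(st.1.getD (pvIdx n nxt) true) then
    (st.1.set (pvIdx n nxt) true, st.2.1 ++ [nxt], st.2.2 + 1)
  else st

-- termination measure fact for the BFS while-loop (cited by `decreasing_by` below)
theorem pvBfsVisit_measure (n : Int) (l : List Int) (vis : List Bool) (q : List Int) (c : Int) :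
    2 * ((l.foldl (pvBfsVisit n) (vis, q, c)).1.count false)
      + ((l.foldl (pvBfsVisit n) (vis, q, c)).2.1.length)
      ≤ 2 * vis.count false + q.length := by
  induction l generalizing vis q c with
  | nil => simp
  | cons x xs ih =>
    simp only [List.foldl_cons]
    by_cases h : (vis.getD (pvIdx n x) true) = false
    · have hlt : pvIdx n x < vis.length := by
        by_contra hge
        rw [List.getD_eq_getElem?_getD, List.getElem?_eq_none (by omega)] at h
        simp at h
      have hget : vis[pvIdx n x] = false := by
        rw [List.getD_eq_getElem?_getD, List.getElem?_eq_getElem hlt] at h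
        simpa using h
      have hmem : false ∈ vis := hget ▸ List.getElem_mem hlt
      have hpos : 0 < vis.count false := List.count_pos_iff.mpr hmem
      have hcount : (vis.set (pvIdx n x) true).count false + 1 = vis.count false := by
        rw [List.count_set hlt]
        simp [hget]
        omega
      have hstep : pvBfsVisit n (vis, q, c) x = (vis.set (pvIdx n x) true, q ++ [x], c + 1) := by
        simp only [pvBfsVisit]; rw [h]; simp
      rw [hstep]
      have hih := ih (vis.set (pvIdx n x) true) (q ++ [x]) (c + 1)
      simp only [List.length_append, List.length_cons, List.length_nil] at hih
      omega
    · have h' : vis.getD (pvIdx n x) true = true := Bool.ne_false_iff.mp h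
      have hstep : pvBfsVisit n (vis, q, c) x = (vis, q, c) := by
        simp only [pvBfsVisit]; rw [h']; simp
      rw [hstep]
      exact ih vis q c

-- the `while q:` loop of A; state = (visited, q, count)
def pvBfsLoop (n : Int) (graph : List (List Int)) (vis : List Bool) (q : List Int) (count : Int) : Int :=
  match q with
  | [] => count
  | node :: rest =>
    let st := (graph.getD (pvIdx n node) []).foldl (pvBfsVisit n) (vis, rest, count)
    pvBfsLoop n graph st.1 st.2.1 st.2.2
termination_by 2 * vis.count false + q.length
decreasing_by
  have := pvBfsVisit_measure n (graph.getD (pvIdx n node) []) vis rest count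
  simp only [List.length_cons]
  omega

def count_reachable_from_zero (n : Int) (edges : List (List Int)) : Int :=
  let graph := pvBuildGraph n edges
  let vis := (List.replicate n.toNat false).set 0 true
  pvBfsLoop n graph vis [0] 1

-- ===== PORT B =====
-- body of `for u, v in edges: if visited[u] and not visited[v]: ...`; state = (visited, changed)
def pvFixEdge (n : Int) (st : List Bool × Bool) (e : List Int) : List Bool × Bool :=
  match e with
  | [u, v] =>
    if st.1.getD (pvIdx n u) false && !(st.1.getD (pvIdx n v) true) then
      (st.1.set (pvIdx n v) true, true)
    else st
  | _ => st

-- `for _ in range(n): ... if not changed: break`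
def pvFixLoop (n : Int) (edges : List (List Int)) (vis : List Bool) : Nat → List Bool
  | 0 => vis
  | k + 1 =>
    let st := edges.foldl (pvFixEdge n) (vis, false)
    if st.2 then pvFixLoop n edges st.1 k else st.1

def count_reachable_from_zero_alt (n : Int) (edges : List (List Int)) : Int :=
  let vis := (List.replicate n.toNat false).set 0 true
  (pvFixLoop n edges vis n.toNat).foldl (fun s b => s + (if b then 1 else 0)) 0

-- ===== PRECONDITION & SPEC =====
-- Pre_ excludes: n < 1 (A raises IndexError at `visited[0] = True`), malformed edges that are
-- not 2-lists (ValueError at unpacking), and edges with an endpoint outside [-n, n): A raises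
-- IndexError on any such source endpoint, and on such a target endpoint whenever its source
-- gets visited — whether A raises on an out-of-range target is reachability-dependent, not
-- closed-form, so all out-of-range endpoints are excluded (on the returning ones B agrees with A).
def Pre_count_reachable_from_zero (n : Int) (edges : List (List Int)) : Prop :=
  1 ≤ n ∧ ∀ e ∈ edges, e.length = 2 ∧ ∀ x ∈ e, -n ≤ x ∧ x < n
instance (n : Int) (edges : List (List Int)) : Decidable (Pre_count_reachable_from_zero n edges) := by
  unfold Pre_count_reachable_from_zero; infer_instance

def pvWitness_count_reachable_from_zero : Int × List (List Int) := (3, [[0, 1], [-2, 2], [2, 0]])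

def Spec_count_reachable_from_zero (n : Int) (edges : List (List Int)) (out : Int) : Prop := out = count_reachable_from_zero_alt n edges
instance (n : Int) (edges : List (List Int)) (out : Int) : Decidable (Spec_count_reachable_from_zero n edges out) := by unfold Spec_count_reachable_from_zero; infer_instance

-- ===== CLAIM (what is proved, stated in full; the proofs are below) =====
def Claim_equal_count_reachable_from_zero : Prop := ∀ (n : Int) (edges : List (List Int)), Dom_count_reachable_from_zero n edges → Pre_count_reachable_from_zero n edges → Spec_count_reachable_from_zero n edges (count_reachable_from_zero n edges)

-- ===== LEMMAS AND PROOFS =====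

-- abstract one-step edge relation on normalized vertices, and reachability from 0
def pvAdj (n : Int) (l : List (List Int)) (a b : Nat) : Prop :=
  ∃ u v, [u, v] ∈ l ∧ pvIdx n u = a ∧ pvIdx n v = b

def pvReach (n : Int) (edges : List (List Int)) (i : Nat) : Prop :=
  Relation.ReflTransGen (pvAdj n edges) 0 i

-- "vertex i is marked" (out-of-range ⇒ false)
def pvT (vis : List Bool) (i : Nat) : Prop := vis.getD i false = true

def pvSound (n : Int) (edges : List (List Int)) (w : List Bool) : Prop :=
  ∀ i, pvT w i → pvReach n edges i

def pvClosed (n : Int) (edges : List (List Int)) (w : List Bool) : Prop :=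
  ∀ a b, pvAdj n edges a b → pvT w a → pvT w b

-- ghost variant of A's BFS loop that also returns the final visited array
def pvBfsLoopV (n : Int) (graph : List (List Int)) (vis : List Bool) (q : List Int) (count : Int) : List Bool × Int :=
  match q with
  | [] => (vis, count)
  | node :: rest =>
    let st := (graph.getD (pvIdx n node) []).foldl (pvBfsVisit n) (vis, rest, count)
    pvBfsLoopV n graph st.1 st.2.1 st.2.2
termination_by 2 * vis.count false + q.length
decreasing_by
  have := pvBfsVisit_measure n (graph.getD (pvIdx n node) []) vis rest count
  simp only [List.length_cons]
  omega

theorem pvBfsLoop_eq_V (n : Int) (g : List (List Int)) (vis : List Bool) (q : List Int) (c : Int) :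
    pvBfsLoop n g vis q c = (pvBfsLoopV n g vis q c).2 := by
  induction vis, q, c using pvBfsLoopV.induct (n := n) (graph := g) with
  | case1 vis c => rw [pvBfsLoop, pvBfsLoopV]
  | case2 vis c node rest st ih => rw [pvBfsLoop, pvBfsLoopV]; exact ih

theorem pvIdx_lt (n i : Int) (hn : 1 ≤ n) (h1 : -n ≤ i) (h2 : i < n) : pvIdx n i < n.toNat := by
  unfold pvIdx; split <;> omega

theorem pvIdx_zero (n : Int) : pvIdx n 0 = 0 := by simp [pvIdx]

theorem pvT_getElem (w : List Bool) (i : Nat) (h : i < w.length) : pvT w i ↔ w[i] = true := by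
  rw [pvT, List.getD_eq_getElem?_getD, List.getElem?_eq_getElem h]; simp

-- characterization of the adjacency list built by A
theorem pvGStep_length (n : Int) (g : List (List Int)) (e : List Int) :
    (pvGStep n g e).length = g.length := by
  rcases e with _ | ⟨u, _ | ⟨v, _ | ⟨w, t⟩⟩⟩ <;> simp [pvGStep]

theorem pvGFold_mem (n : Int) (l : List (List Int)) (a : Nat) (x : Int) :
    ∀ (g : List (List Int)), a < g.length →
    (x ∈ (l.foldl (pvGStep n) g).getD a [] ↔ x ∈ g.getD a [] ∨ ∃ u, [u, x] ∈ l ∧ pvIdx n u = a) := by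
  induction l with
  | nil => intro g ha; simp
  | cons e l ih =>
    intro g ha
    rw [List.foldl_cons]
    rw [ih (pvGStep n g e) (by rw [pvGStep_length]; exact ha)]
    have hgd : ∀ (w : List (List Int)) (hw : a < w.length), w.getD a [] = w[a] := by
      intro w hw
      rw [List.getD_eq_getElem?_getD, List.getElem?_eq_getElem hw]; rfl
    rcases e with _ | ⟨u, _ | ⟨v, _ | ⟨w, t⟩⟩⟩
    · simp [pvGStep]
    · simp [pvGStep]
    · -- e = [u, v]
      rw [hgd (pvGStep n g (u :: v :: [])) (by rw [pvGStep_length]; exact ha), hgd g ha]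
      simp only [pvGStep]
      simp only [List.getElem_modify]
      by_cases huv : pvIdx n u = a
      · simp only [huv, if_pos rfl]
        constructor
        · rintro (h | h)
          · rcases (List.mem_append.mp h) with h1 | h1
            · exact Or.inl h1
            · simp at h1; subst h1; exact Or.inr ⟨u, by simp, huv⟩
          · rcases h with ⟨u', h1, h2⟩; exact Or.inr ⟨u', by simp [h1], h2⟩
        · rintro (h | ⟨u', h1, h2⟩)
          · exact Or.inl (List.mem_append.mpr (Or.inl h))
          · rcases (List.mem_cons.mp h1) with h3 | h3
            · have hx : x = v := by
                have h4 := h3; simp at h4; exact h4.2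
              exact Or.inl (List.mem_append.mpr (Or.inr (by simp [hx])))
            · exact Or.inr ⟨u', h3, h2⟩
      · rw [if_neg huv]
        constructor
        · rintro (h | ⟨u', h1, h2⟩)
          · exact Or.inl h
          · exact Or.inr ⟨u', by simp [h1], h2⟩
        · rintro (h | ⟨u', h1, h2⟩)
          · exact Or.inl h
          · rcases (List.mem_cons.mp h1) with h3 | h3
            · exfalso; apply huv; injection h3 with h4 _; rw [← h4]; exact h2
            · exact Or.inr ⟨u', h3, h2⟩
    · simp [pvGStep]

theorem pvBuildGraph_mem (n : Int) (edges : List (List Int)) (a : Nat) (ha : a < n.toNat) (x : Int) :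
    x ∈ (pvBuildGraph n edges).getD a [] ↔ ∃ u, [u, x] ∈ edges ∧ pvIdx n u = a := by
  rw [pvBuildGraph, pvGFold_mem n edges a x _ (by simpa using ha)]
  have : (List.replicate n.toNat ([] : List Int)).getD a [] = [] := by
    rw [List.getD_eq_getElem?_getD, List.getElem?_replicate]
    split <;> rfl
  simp [this]

theorem pvT_set_self (w : List Bool) (i : Nat) (h : i < w.length) : pvT (w.set i true) i := by
  rw [pvT, List.getD_eq_getElem?_getD, List.getElem?_set]
  simp [h]

theorem pvT_set_mono (w : List Bool) (i j : Nat) (h : pvT w j) : pvT (w.set i true) j := by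
  rw [pvT, List.getD_eq_getElem?_getD, List.getElem?_set]
  rw [pvT, List.getD_eq_getElem?_getD] at h
  split
  · rename_i he
    subst he
    have : i < w.length := by
      by_contra hge
      rw [List.getElem?_eq_none (by omega)] at h
      simp at h
    simp [this]
  · exact h

theorem pvT_set_cases (w : List Bool) (i j : Nat) (h : pvT (w.set i true) j) : pvT w j ∨ j = i := by
  by_cases he : i = j
  · exact Or.inr he.symm
  · left
    rw [pvT, List.getD_eq_getElem?_getD, List.getElem?_set, if_neg he] at h
    exact h

theorem pvT_of_getD_true (w : List Bool) (i : Nat) (hlt : i < w.length) (h : w.getD i true = true) :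
    pvT w i := by
  rw [List.getD_eq_getElem?_getD, List.getElem?_eq_getElem hlt] at h
  rw [pvT, List.getD_eq_getElem?_getD, List.getElem?_eq_getElem hlt]
  exact h

theorem pvCount_set_true (w : List Bool) (i : Nat) (hlt : i < w.length) (h : w[i] = false) :
    (w.set i true).count true = w.count true + 1 := by
  rw [List.count_set hlt]
  simp [h]

theorem pvUnmarked_range (w : List Bool) (i : Nat) (h : w.getD i true = false) :
    i < w.length ∧ w[i]'(by
      by_contra hge
      rw [List.getD_eq_getElem?_getD, List.getElem?_eq_none (by omega)] at h
      simp at h) = false := by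
  have hlt : i < w.length := by
    by_contra hge
    rw [List.getD_eq_getElem?_getD, List.getElem?_eq_none (by omega)] at h
    simp at h
  refine ⟨hlt, ?_⟩
  rw [List.getD_eq_getElem?_getD, List.getElem?_eq_getElem hlt] at h
  simpa using h

-- the inner `for nxt in graph[node]` fold of A
theorem pvVisitFold (n : Int) (N : Nat) (l : List Int) :
    ∀ (vis : List Bool) (q : List Int) (c : Int), vis.length = N → c = (vis.count true : Int) →
    (∀ v ∈ l, pvIdx n v < N) →
    ((l.foldl (pvBfsVisit n) (vis, q, c)).1.length = N)
    ∧ ((l.foldl (pvBfsVisit n) (vis, q, c)).2.2 = ((l.foldl (pvBfsVisit n) (vis, q, c)).1.count true : Int))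
    ∧ (∀ i, pvT vis i → pvT (l.foldl (pvBfsVisit n) (vis, q, c)).1 i)
    ∧ (∀ v ∈ l, pvT (l.foldl (pvBfsVisit n) (vis, q, c)).1 (pvIdx n v))
    ∧ (∀ j, j ∈ (l.foldl (pvBfsVisit n) (vis, q, c)).2.1 → j ∈ q ∨ j ∈ l)
    ∧ (∀ j ∈ q, j ∈ (l.foldl (pvBfsVisit n) (vis, q, c)).2.1)
    ∧ (∀ i, pvT (l.foldl (pvBfsVisit n) (vis, q, c)).1 i → pvT vis i ∨ ∃ v ∈ l, pvIdx n v = i)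
    ∧ (∀ i, pvT (l.foldl (pvBfsVisit n) (vis, q, c)).1 i → pvT vis i ∨ ∃ j ∈ (l.foldl (pvBfsVisit n) (vis, q, c)).2.1, pvIdx n j = i) := by
  induction l with
  | nil =>
    intro vis q c hlen hc hl
    refine ⟨hlen, hc, fun i h => h, by simp, fun j hj => Or.inl hj, fun j hj => hj, fun i h => Or.inl h, fun i h => Or.inl h⟩
  | cons v l ih =>
    intro vis q c hlen hc hl
    simp only [List.foldl_cons]
    by_cases h : (vis.getD (pvIdx n v) true) = false
    · obtain ⟨hlt, hget⟩ := pvUnmarked_range vis (pvIdx n v) h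
      have hstep : pvBfsVisit n (vis, q, c) v = (vis.set (pvIdx n v) true, q ++ [v], c + 1) := by
        simp only [pvBfsVisit]; rw [h]; simp
      rw [hstep]
      have hlen' : (vis.set (pvIdx n v) true).length = N := by simpa using hlen
      have hc' : c + 1 = (((vis.set (pvIdx n v) true).count true : Nat) : Int) := by
        rw [pvCount_set_true vis _ hlt hget]; push_cast; omega
      obtain ⟨ih1, ih2, ih3, ih4, ih5, ih6, ih7, ih8⟩ :=
        ih (vis.set (pvIdx n v) true) (q ++ [v]) (c + 1) hlen' hc' (fun x hx => hl x (by simp [hx]))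
      refine ⟨ih1, ih2, ?_, ?_, ?_, ?_, ?_, ?_⟩
      · intro i hi; exact ih3 i (pvT_set_mono vis _ i hi)
      · intro x hx
        rcases List.mem_cons.mp hx with hx | hx
        · subst hx; exact ih3 _ (pvT_set_self vis _ hlt)
        · exact ih4 x hx
      · intro j hj
        rcases ih5 j hj with hj1 | hj1
        · rcases List.mem_append.mp hj1 with h2 | h2
          · exact Or.inl h2
          · simp at h2; subst h2; exact Or.inr (by simp)
        · exact Or.inr (by simp [hj1])
      · intro j hj; exact ih6 j (List.mem_append.mpr (Or.inl hj))
      · intro i hi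
        rcases ih7 i hi with h2 | h2
        · rcases pvT_set_cases vis _ i h2 with h3 | h3
          · exact Or.inl h3
          · exact Or.inr ⟨v, by simp, h3.symm⟩
        · rcases h2 with ⟨x, hx, hxi⟩; exact Or.inr ⟨x, by simp [hx], hxi⟩
      · intro i hi
        rcases ih8 i hi with h2 | h2
        · rcases pvT_set_cases vis _ i h2 with h3 | h3
          · exact Or.inl h3
          · refine Or.inr ⟨v, ih6 v (List.mem_append.mpr (Or.inr (by simp))), h3.symm⟩
        · exact Or.inr h2
    · have h' : vis.getD (pvIdx n v) true = true := Bool.ne_false_iff.mp h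
      have hvlt : pvIdx n v < vis.length := hlen ▸ hl v (by simp)
      have hT : pvT vis (pvIdx n v) := pvT_of_getD_true vis _ hvlt h'
      have hstep : pvBfsVisit n (vis, q, c) v = (vis, q, c) := by
        simp only [pvBfsVisit]; rw [h']; simp
      rw [hstep]
      obtain ⟨ih1, ih2, ih3, ih4, ih5, ih6, ih7, ih8⟩ :=
        ih vis q c hlen hc (fun x hx => hl x (by simp [hx]))
      refine ⟨ih1, ih2, ih3, ?_, ?_, ih6, ?_, ih8⟩
      · intro x hx
        rcases List.mem_cons.mp hx with hx | hx
        · subst hx; exact ih3 _ hT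
        · exact ih4 x hx
      · intro j hj
        rcases ih5 j hj with h2 | h2
        · exact Or.inl h2
        · exact Or.inr (by simp [h2])
      · intro i hi
        rcases ih7 i hi with h2 | h2
        · exact Or.inl h2
        · rcases h2 with ⟨x, hx, hxi⟩; exact Or.inr ⟨x, by simp [hx], hxi⟩

-- the main BFS invariant, by functional induction on the ghost loop
theorem pvBfsV_main (n : Int) (edges : List (List Int)) (hn : 1 ≤ n)
    (hE : ∀ e ∈ edges, e.length = 2 ∧ ∀ x ∈ e, -n ≤ x ∧ x < n) :
    ∀ (vis : List Bool) (q : List Int) (c : Int),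
    vis.length = n.toNat → pvT vis 0 → pvSound n edges vis → c = (vis.count true : Int) →
    (∀ j ∈ q, pvT vis (pvIdx n j) ∧ pvIdx n j < n.toNat) →
    (∀ a, pvT vis a → (∃ j ∈ q, pvIdx n j = a) ∨ (∀ b, pvAdj n edges a b → pvT vis b)) →
    ((pvBfsLoopV n (pvBuildGraph n edges) vis q c).1.length = n.toNat)
    ∧ pvT (pvBfsLoopV n (pvBuildGraph n edges) vis q c).1 0
    ∧ pvSound n edges (pvBfsLoopV n (pvBuildGraph n edges) vis q c).1
    ∧ pvClosed n edges (pvBfsLoopV n (pvBuildGraph n edges) vis q c).1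
    ∧ (pvBfsLoopV n (pvBuildGraph n edges) vis q c).2 = ((pvBfsLoopV n (pvBuildGraph n edges) vis q c).1.count true : Int) := by
  intro vis q c
  induction vis, q, c using pvBfsLoopV.induct (n := n) (graph := pvBuildGraph n edges) with
  | case1 vis c =>
    intro hlen h0 hSound hc hQ hC
    rw [pvBfsLoopV]
    refine ⟨hlen, h0, hSound, ?_, hc⟩
    intro a b hab ha
    rcases hC a ha with ⟨j, hj, _⟩ | h2
    · exact absurd hj (List.not_mem_nil)
    · exact h2 b hab
  | case2 vis c node rest st ih =>
    intro hlen h0 hSound hc hQ hC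
    rw [pvBfsLoopV]
    obtain ⟨hTnode, hnode⟩ := hQ node (by simp)
    have hreach : pvReach n edges (pvIdx n node) := hSound _ hTnode
    have hl : ∀ v ∈ (pvBuildGraph n edges).getD (pvIdx n node) [],
        pvIdx n v < n.toNat ∧ pvAdj n edges (pvIdx n node) (pvIdx n v) := by
      intro v hv
      obtain ⟨u, hu, hui⟩ := (pvBuildGraph_mem n edges _ hnode v).mp hv
      obtain ⟨-, hr⟩ := hE _ hu
      obtain ⟨hr1, hr2⟩ := hr v (by simp)
      exact ⟨pvIdx_lt n v hn hr1 hr2, ⟨u, v, hu, hui, rfl⟩⟩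
    obtain ⟨ih1, ih2, ih3, ih4, ih5, ih6, ih7, ih8⟩ :=
      pvVisitFold n n.toNat ((pvBuildGraph n edges).getD (pvIdx n node) []) vis rest c hlen hc
        (fun v hv => (hl v hv).1)
    apply ih
    · exact ih1
    · exact ih3 0 h0
    · intro i hi
      rcases ih7 i hi with h2 | ⟨v, hv, hvi⟩
      · exact hSound i h2
      · exact hvi ▸ Relation.ReflTransGen.tail hreach (hl v hv).2
    · exact ih2
    · intro j hj
      rcases ih5 j hj with h2 | h2
      · obtain ⟨hT, hr⟩ := hQ j (by simp [h2])
        exact ⟨ih3 _ hT, hr⟩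
      · exact ⟨ih4 j h2, (hl j h2).1⟩
    · intro a ha
      rcases ih8 a ha with h2 | h2
      · rcases hC a h2 with ⟨j, hj, hja⟩ | h3
        · rcases List.mem_cons.mp hj with hj | hj
          · right
            intro b hab
            obtain ⟨u, v, huv, hua, hvb⟩ := hab
            have hua' : pvIdx n u = pvIdx n node := by rw [hua, ← hja, hj]
            have hv : v ∈ (pvBuildGraph n edges).getD (pvIdx n node) [] :=
              (pvBuildGraph_mem n edges _ hnode v).mpr ⟨u, huv, hua'⟩
            exact hvb ▸ ih4 v hv
          · exact Or.inl ⟨j, ih6 j hj, hja⟩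
        · exact Or.inr (fun b hab => ih3 b (h3 b hab))
      · exact Or.inl h2

-- sound + closed + contains 0  ⇒  marked = reachable
theorem pvCharacterize (n : Int) (edges : List (List Int)) (w : List Bool)
    (h0 : pvT w 0) (hs : pvSound n edges w) (hc : pvClosed n edges w) :
    ∀ i, pvT w i ↔ pvReach n edges i := by
  intro i
  constructor
  · exact hs i
  · intro h
    induction h with
    | refl => exact h0
    | tail _ hab ih => exact hc _ _ hab ih

-- one sweep of B over the edge list
theorem pvRoundFold (n : Int) (N : Nat) (l : List (List Int))
    (hl : ∀ e ∈ l, e.length = 2 ∧ ∀ x ∈ e, -n ≤ x ∧ x < n) (hn : 1 ≤ n) (hN : N = n.toNat) :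
    ∀ (vis : List Bool) (f : Bool), vis.length = N →
    ((l.foldl (pvFixEdge n) (vis, f)).1.length = N)
    ∧ (∀ i, pvT vis i → pvT (l.foldl (pvFixEdge n) (vis, f)).1 i)
    ∧ (vis.count true ≤ (l.foldl (pvFixEdge n) (vis, f)).1.count true)
    ∧ (∀ edges, pvSound n edges vis → (∀ e ∈ l, e ∈ edges) → pvSound n edges (l.foldl (pvFixEdge n) (vis, f)).1)
    ∧ (f = true → (l.foldl (pvFixEdge n) (vis, f)).2 = true)
    ∧ ((l.foldl (pvFixEdge n) (vis, f)).2 = false →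
        (l.foldl (pvFixEdge n) (vis, f)).1 = vis ∧ ∀ a b, pvAdj n l a b → pvT vis a → pvT vis b)
    ∧ (f = false → (l.foldl (pvFixEdge n) (vis, f)).2 = true →
        vis.count true < (l.foldl (pvFixEdge n) (vis, f)).1.count true) := by
  induction l with
  | nil =>
    intro vis f hlen
    refine ⟨hlen, fun i h => h, le_refl _, fun edges hs _ => hs, fun h => h, ?_, ?_⟩
    · intro hf
      refine ⟨rfl, ?_⟩
      rintro a b ⟨u, v, huv, -, -⟩ -
      exact absurd huv (List.not_mem_nil)
    · intro h1 h2; rw [h1] at h2; exact absurd h2 (by simp)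
  | cons e l ih =>
    intro vis f hlen
    have hle : ∀ e' ∈ l, e'.length = 2 ∧ ∀ x ∈ e', -n ≤ x ∧ x < n := fun e' he' => hl e' (by simp [he'])
    simp only [List.foldl_cons]
    rcases he : e with _ | ⟨u, _ | ⟨v, _ | ⟨w, t⟩⟩⟩
    · obtain ⟨h2, -⟩ := hl e (by simp); rw [he] at h2; simp at h2
    · obtain ⟨h2, -⟩ := hl e (by simp); rw [he] at h2; simp at h2
    · -- e = [u, v]
      obtain ⟨-, hr⟩ := hl e (by simp)
      rw [he] at hr
      have hau := hr u (by simp)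
      have hav := hr v (by simp)
      have ha : pvIdx n u < N := hN ▸ pvIdx_lt n u hn hau.1 hau.2
      have hb : pvIdx n v < N := hN ▸ pvIdx_lt n v hn hav.1 hav.2
      by_cases hg : (vis.getD (pvIdx n u) false && !(vis.getD (pvIdx n v) true)) = true
      · obtain ⟨hg1, hg2'⟩ : vis.getD (pvIdx n u) false = true ∧ vis.getD (pvIdx n v) true = false := by
          simpa using hg
        obtain ⟨hblt, hbget⟩ := pvUnmarked_range vis (pvIdx n v) hg2'
        have hstep : pvFixEdge n (vis, f) [u, v] = (vis.set (pvIdx n v) true, true) := by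
          simp only [pvFixEdge]; rw [hg]; simp
        rw [hstep]
        have hlen' : (vis.set (pvIdx n v) true).length = N := by simpa using hlen
        obtain ⟨c1, c2, c3, c4, c5, c6, c7⟩ := ih hle (vis.set (pvIdx n v) true) true hlen'
        have hcnt : (vis.set (pvIdx n v) true).count true = vis.count true + 1 :=
          pvCount_set_true vis _ hblt hbget
        refine ⟨c1, ?_, ?_, ?_, fun _ => c5 rfl, ?_, ?_⟩
        · intro i hi; exact c2 i (pvT_set_mono vis _ i hi)
        · omega
        · intro edges hs hsub
          refine c4 edges ?_ (fun e' he' => hsub e' (by simp [he']))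
          intro i hi
          rcases pvT_set_cases vis _ i hi with h3 | h3
          · exact hs i h3
          · subst h3
            have hadj : pvAdj n edges (pvIdx n u) (pvIdx n v) :=
              ⟨u, v, hsub [u, v] (by simp), rfl, rfl⟩
            exact Relation.ReflTransGen.tail (hs _ hg1) hadj
        · intro hfl
          exact absurd (c5 rfl) (by rw [hfl]; simp)
        · intro _ _
          omega
      · have hg' : (vis.getD (pvIdx n u) false && !(vis.getD (pvIdx n v) true)) = false := by
          revert hg; cases (vis.getD (pvIdx n u) false && !(vis.getD (pvIdx n v) true)) <;> simp
        have hstep : pvFixEdge n (vis, f) [u, v] = (vis, f) := by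
          simp only [pvFixEdge]; rw [hg']; simp
        rw [hstep]
        obtain ⟨c1, c2, c3, c4, c5, c6, c7⟩ := ih hle vis f hlen
        refine ⟨c1, c2, c3, ?_, c5, ?_, c7⟩
        · intro edges hs hsub
          exact c4 edges hs (fun e' he' => hsub e' (by simp [he']))
        · intro hfl
          obtain ⟨heq, hstab⟩ := c6 hfl
          refine ⟨heq, ?_⟩
          rintro a b ⟨u', v', huv', hua', hvb'⟩ hTa
          rcases List.mem_cons.mp huv' with h3 | h3
          · obtain ⟨hu1, hv1⟩ : u' = u ∧ v' = v := by simpa using h3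
            have hx : vis.getD (pvIdx n u) false = true := by
              rw [← hua', hu1] at hTa; exact hTa
            have hy : vis.getD (pvIdx n v) true = true := by
              revert hg
              rw [hx]
              cases hyy : vis.getD (pvIdx n v) true <;> simp
            rw [← hvb', hv1]
            exact pvT_of_getD_true vis _ (by omega) hy
          · exact hstab a b ⟨u', v', h3, hua', hvb'⟩ hTa
    · obtain ⟨h2, -⟩ := hl e (by simp); rw [he] at h2; simp at h2

-- B's outer loop: after k sweeps, either closed or k new vertices were marked
theorem pvFixLoop_main (n : Int) (edges : List (List Int)) (hn : 1 ≤ n)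
    (hE : ∀ e ∈ edges, e.length = 2 ∧ ∀ x ∈ e, -n ≤ x ∧ x < n) :
    ∀ (k : Nat) (vis : List Bool), vis.length = n.toNat → pvT vis 0 → pvSound n edges vis →
    ((pvFixLoop n edges vis k).length = n.toNat)
    ∧ pvT (pvFixLoop n edges vis k) 0
    ∧ pvSound n edges (pvFixLoop n edges vis k)
    ∧ (pvClosed n edges (pvFixLoop n edges vis k)
       ∨ vis.count true + k ≤ (pvFixLoop n edges vis k).count true) := by
  intro k
  induction k with
  | zero =>
    intro vis hlen h0 hS
    rw [pvFixLoop]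
    exact ⟨hlen, h0, hS, Or.inr (by omega)⟩
  | succ k ih =>
    intro vis hlen h0 hS
    rw [pvFixLoop]
    obtain ⟨r1, r2, r3, r4, r5, r6, r7⟩ :=
      pvRoundFold n n.toNat edges hE hn rfl vis false hlen
    by_cases h2 : (edges.foldl (pvFixEdge n) (vis, false)).2 = true
    · rw [if_pos h2]
      have hS' := r4 edges hS (fun e he => he)
      obtain ⟨c1, c2, c3, c4⟩ := ih (edges.foldl (pvFixEdge n) (vis, false)).1 r1 (r2 0 h0) hS'
      refine ⟨c1, c2, c3, ?_⟩
      rcases c4 with hcl | hcount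
      · exact Or.inl hcl
      · right
        have := r7 rfl h2
        omega
    · rw [if_neg h2]
      obtain ⟨heq, hstab⟩ := r6 (by revert h2; cases (edges.foldl (pvFixEdge n) (vis, false)).2 <;> simp)
      rw [heq]
      exact ⟨hlen, h0, hS, Or.inl hstab⟩

-- the initial visited array
theorem pvInit (N : Nat) (hN : 1 ≤ N) :
    ((List.replicate N false).set 0 true).length = N
    ∧ pvT ((List.replicate N false).set 0 true) 0
    ∧ (∀ i, pvT ((List.replicate N false).set 0 true) i → i = 0)
    ∧ ((List.replicate N false).set 0 true).count true = 1 := by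
  have hlen : ((List.replicate N false).set 0 true).length = N := by simp
  have hget : ∀ i, i < N → ((List.replicate N false).set 0 true)[i]? = some (decide (i = 0)) := by
    intro i hi
    rw [List.getElem?_set]
    by_cases h0 : i = 0
    · subst h0
      rw [if_pos rfl, if_pos (by simp; omega)]
      simp
    · rw [if_neg (by omega), List.getElem?_replicate, if_pos hi]
      simp [h0]
  refine ⟨hlen, ?_, ?_, ?_⟩
  · rw [pvT, List.getD_eq_getElem?_getD, hget 0 (by omega)]
    simp
  · intro i hi
    rw [pvT, List.getD_eq_getElem?_getD] at hi
    by_cases hlt : i < N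
    · rw [hget i hlt] at hi
      simpa using hi
    · exfalso
      rw [List.getElem?_eq_none (by rw [hlen]; omega)] at hi
      simp at hi
  · rw [pvCount_set_true _ 0 (by rw [List.length_replicate]; omega) (by simp [List.getElem_replicate])]
    simp [List.count_replicate]

theorem pvSumFold (l : List Bool) (s : Int) :
    l.foldl (fun s b => s + (if b then 1 else 0)) s = s + (l.count true : Int) := by
  induction l generalizing s with
  | nil => simp
  | cons x xs ih => cases x <;> simp [ih, List.count_cons] <;> push_cast <;> ring

-- ===== VERDICT (by name: the statement is the Claim_ definition above) =====
theorem count_reachable_from_zero_spec : Claim_equal_count_reachable_from_zero := by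
  intro n edges hDom hPre
  obtain ⟨hn, hE⟩ := hPre
  show count_reachable_from_zero n edges = count_reachable_from_zero_alt n edges
  have hN : 1 ≤ n.toNat := by omega
  obtain ⟨i1, i2, i3, i4⟩ := pvInit n.toNat hN
  have hSound0 : pvSound n edges ((List.replicate n.toNat false).set 0 true) := by
    intro i hi
    rw [i3 i hi]
    exact Relation.ReflTransGen.refl
  have hA : count_reachable_from_zero n edges
      = pvBfsLoop n (pvBuildGraph n edges) ((List.replicate n.toNat false).set 0 true) [0] 1 := rfl
  have hB : count_reachable_from_zero_alt n edges
      = (pvFixLoop n edges ((List.replicate n.toNat false).set 0 true) n.toNat).foldl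
          (fun s b => s + (if b then 1 else 0)) 0 := rfl
  rw [hA, hB, pvBfsLoop_eq_V, pvSumFold]
  obtain ⟨a1, a2, a3, a4, a5⟩ :=
    pvBfsV_main n edges hn hE ((List.replicate n.toNat false).set 0 true) [0] 1
      i1 i2 hSound0 (by rw [i4]; simp)
      (by
        intro j hj
        have hj0 : j = 0 := by simpa using hj
        subst hj0
        rw [pvIdx_zero]
        exact ⟨i2, by omega⟩)
      (by
        intro a ha
        left
        exact ⟨0, by simp, by rw [pvIdx_zero, i3 a ha]⟩)
  obtain ⟨b1, b2, b3, b4⟩ := pvFixLoop_main n edges hn hE n.toNat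
    ((List.replicate n.toNat false).set 0 true) i1 i2 hSound0
  have bClosed : pvClosed n edges (pvFixLoop n edges ((List.replicate n.toNat false).set 0 true) n.toNat) := by
    rcases b4 with h | h
    · exact h
    · exfalso
      have hle := List.count_le_length (l := pvFixLoop n edges ((List.replicate n.toNat false).set 0 true) n.toNat) (a := true)
      rw [b1] at hle
      rw [i4] at h
      omega
  have charA := pvCharacterize n edges _ a2 a3 a4
  have charB := pvCharacterize n edges _ b2 b3 bClosed
  have hw : (pvBfsLoopV n (pvBuildGraph n edges) ((List.replicate n.toNat false).set 0 true) [0] 1).1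
      = pvFixLoop n edges ((List.replicate n.toNat false).set 0 true) n.toNat := by
    apply List.ext_getElem (by rw [a1, b1])
    intro i h1 h2
    have hiff : ((pvBfsLoopV n (pvBuildGraph n edges) ((List.replicate n.toNat false).set 0 true) [0] 1).1[i] = true)
        ↔ ((pvFixLoop n edges ((List.replicate n.toNat false).set 0 true) n.toNat)[i] = true) := by
      rw [← pvT_getElem _ _ h1, ← pvT_getElem _ _ h2, charA i, charB i]
    cases hx : (pvBfsLoopV n (pvBuildGraph n edges) ((List.replicate n.toNat false).set 0 true) [0] 1).1[i] <;>
      cases hy : (pvFixLoop n edges ((List.replicate n.toNat false).set 0 true) n.toNat)[i] <;> simp_all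
  rw [a5, hw]
  omega
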